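-- pv_equiv track=rewrite | github.com/ElPlaguister/Def-DTS | src/autoseg.py | extract_pred
-- ===== SOURCE A (Python) =====
-- from typing import List
--
-- def extract_pred(model_output: List[bool]) -> List[int]:
--     boundary = [0]
--     for output in model_output:
--         if output:
--             boundary.append(1)
--         else:
--             boundary[-1] += 1
--
--     return boundary
-- ===== SOURCE B (Python) =====
-- from typing import List
--
-- def extract_pred(model_output: List[bool]) -> List[int]:
--     b = [0] + [i for i, o in enumerate(model_output) if o] + [len(model_output)]
--     return [y - x for x, y in zip(b, b[1:])]
-- ===== Notes on version B (the rewrite author's own statement) =====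
-- stated objective: alternative
-- what changed: Replaces the stateful loop that appends or increments the last element of a growing boundary list with a two-stage computation: collect the indices of True flags, pad them with 0 and len, and take consecutive differences.
import Mathlib
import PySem

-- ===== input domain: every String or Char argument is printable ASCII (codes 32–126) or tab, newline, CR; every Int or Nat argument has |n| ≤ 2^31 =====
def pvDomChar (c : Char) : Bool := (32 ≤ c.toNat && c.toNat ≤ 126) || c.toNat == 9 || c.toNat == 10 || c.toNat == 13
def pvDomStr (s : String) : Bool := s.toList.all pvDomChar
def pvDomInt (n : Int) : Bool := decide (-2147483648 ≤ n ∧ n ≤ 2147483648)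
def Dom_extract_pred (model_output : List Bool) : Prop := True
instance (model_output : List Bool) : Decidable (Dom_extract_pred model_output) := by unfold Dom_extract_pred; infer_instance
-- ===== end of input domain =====

-- B replaces A's in-place last-element mutation loop by collecting True indices and taking
-- consecutive differences of the augmented boundary list (objective: alternative decomposition).


-- ===== PORT A =====
-- boundary[-1] += 1: boundary is always nonempty, so getLast?.getD 0 is exact here
def extract_pred (model_output : List Bool) : List Int :=
  model_output.foldl
    (fun boundary output =>
      if output then boundary ++ [1]
      else boundary.dropLast ++ [boundary.getLast?.getD 0 + 1])
    [0]

-- ===== PORT B =====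
def extract_pred_alt (model_output : List Bool) : List Int :=
  let b : List Int :=
    [0] ++ (PySem.List.enumerate model_output).filterMap
             (fun p => if p.2 then some p.1 else none)
       ++ [(model_output.length : Int)]
  (b.zip (b.drop 1)).map (fun p => p.2 - p.1)

-- ===== PRECONDITION & SPEC =====
def Spec_extract_pred (model_output : List Bool) (out : List Int) : Prop := out = extract_pred_alt model_output
instance (model_output : List Bool) (out : List Int) : Decidable (Spec_extract_pred model_output out) := by unfold Spec_extract_pred; infer_instance

-- ===== CLAIM (what is proved, stated in full; the proofs are below) =====
def Claim_equal_extract_pred : Prop := ∀ (model_output : List Bool), Dom_extract_pred model_output → Spec_extract_pred model_output (extract_pred model_output)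

-- ===== LEMMAS AND PROOFS =====

-- the difference kernel of port B
def pvDiffs (b : List Int) : List Int := (b.zip (b.drop 1)).map (fun p => p.2 - p.1)

-- B's True-index list
def pvTrues (l : List Bool) : List Int :=
  (PySem.List.enumerate l).filterMap (fun p => if p.2 then some p.1 else none)

lemma pvDiffs_cons_cons (x y : Int) (t : List Int) :
    pvDiffs (x :: y :: t) = (y - x) :: pvDiffs (y :: t) := by
  simp [pvDiffs]

lemma pvDiffs_snoc : ∀ (u : List Int) (a c : Int),
    pvDiffs (u ++ [a, c]) = pvDiffs (u ++ [a]) ++ [c - a] := by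
  intro u
  induction u with
  | nil => intro a c; simp [pvDiffs]
  | cons x u ih =>
    intro a c
    cases u with
    | nil => simp [pvDiffs]
    | cons y u' =>
      have h := ih a c
      simp only [List.cons_append] at h ⊢
      rw [pvDiffs_cons_cons, pvDiffs_cons_cons, h]
      simp

lemma pvTrues_append_singleton (l : List Bool) (x : Bool) :
    pvTrues (l ++ [x]) = pvTrues l ++ (if x then [(l.length : Int)] else []) := by
  simp [pvTrues, PySem.List.enumerate_append, PySem.List.enumerate_cons,
        PySem.List.enumerate_nil, List.filterMap_append]
  cases x <;> simp

lemma pvAlt_eq (l : List Bool) :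
    extract_pred_alt l = pvDiffs ([0] ++ pvTrues l ++ [(l.length : Int)]) := by
  rfl

lemma extract_pred_eq_alt : ∀ (l : List Bool), extract_pred l = extract_pred_alt l := by
  intro l
  induction l using List.reverseRecOn with
  | nil => rfl
  | append_singleton l x ih =>
    unfold extract_pred at ih ⊢
    rw [List.foldl_append]
    simp only [List.foldl_cons, List.foldl_nil]
    rw [pvAlt_eq, pvTrues_append_singleton]
    have hn : (((l ++ [x]).length : Nat) : Int) = (l.length : Int) + 1 := by
      simp [List.length_append]
    rw [hn]
    obtain ⟨u', m, hm⟩ : ∃ L b, ((0 : Int) :: pvTrues l) = L ++ [b] := by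
      rcases List.eq_nil_or_concat ((0 : Int) :: pvTrues l) with h | ⟨L, b, h⟩
      · exact absurd h (by simp)
      · exact ⟨L, b, by simpa [List.concat_eq_append] using h⟩
    have h0 : ∀ c : Int, [0] ++ pvTrues l ++ [c] = u' ++ [m, c] := by
      intro c
      rw [show ([0] ++ pvTrues l ++ [c] : List Int) = ((0 : Int) :: pvTrues l) ++ [c] by simp, hm]
      simp
    cases x with
    | true =>
      simp only [if_true]
      rw [show ([0] ++ (pvTrues l ++ [(l.length : Int)]) ++ [(l.length : Int) + 1] : List Int)
            = (u' ++ [m]) ++ [(l.length : Int), (l.length : Int) + 1] from by simp [← hm],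
          pvDiffs_snoc]
      rw [show ((u' ++ [m]) ++ [(l.length : Int)] : List Int)
            = [0] ++ pvTrues l ++ [(l.length : Int)] from by simp [← hm]]
      rw [← pvAlt_eq, ← ih]
      simp
    | false =>
      simp only [Bool.false_eq_true, if_false, List.append_nil]
      rw [h0 ((l.length : Int) + 1), pvDiffs_snoc]
      have hAl : List.foldl
          (fun boundary output =>
            if output = true then boundary ++ [1] else boundary.dropLast ++ [boundary.getLast?.getD 0 + 1])
          [0] l = pvDiffs (u' ++ [m]) ++ [(l.length : Int) - m] := by
        rw [ih, pvAlt_eq, h0 (l.length : Int), pvDiffs_snoc]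
      rw [hAl]
      simp only [List.dropLast_concat, List.getLast?_concat, Option.getD_some]
      rw [show (l.length : Int) - m + 1 = (l.length : Int) + 1 - m from by ring]

-- ===== VERDICT (by name: the statement is the Claim_ definition above) =====
theorem extract_pred_spec : Claim_equal_extract_pred := by
  intro l _
  unfold Spec_extract_pred
  exact extract_pred_eq_alt l
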